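-- pv_equiv track=rewrite | github.com/0akhilesh9/Abstractive_Conversational_QA | utils.py | check
-- ===== SOURCE A (Python) =====
-- def check(start, end):
--   maxprod = -1
--   Xpos = Ypos = 1
--   assert len(start) == len(end)
--   for xpos in range(len(start)):
--     for ypos in range(xpos, len(end)):
--       if start[xpos] * end[ypos] > maxprod:
--         maxprod = start[xpos] * end[ypos]
--         Xpos, Ypos = xpos, ypos
--   return maxprod, Xpos, Ypos
-- ===== SOURCE B (Python) =====
-- def check(start, end):
--     assert len(start) == len(end)
--     best = None           # (prod, i, j): running best with prod > -1, ties -> smaller i, then smaller j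
--     mx = None             # (value, earliest index) of max of start[0..j]
--     mn = None             # (value, earliest index) of min of start[0..j]
--     for j, e in enumerate(end):
--         s = start[j]
--         if mx is None or s > mx[0]:
--             mx = (s, j)
--         if mn is None or s < mn[0]:
--             mn = (s, j)
--         if e > 0:
--             p, i = mx[0] * e, mx[1]
--         elif e < 0:
--             p, i = mn[0] * e, mn[1]
--         else:
--             p, i = 0, 0
--         if p > -1 and (best is None or p > best[0] or (p == best[0] and i < best[1])):
--             best = (p, i, j)
--     return best if best is not None else (-1, 1, 1)
-- ===== Notes on version B (the rewrite author's own statement) =====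
-- stated objective: faster
-- what changed: Replaced the O(n^2) scan over all index pairs i<=j by a single O(n) pass over end that maintains the running max and min of start (with earliest index) and merges each column's best candidate into the running best with A's lex tie-breaking.
import Mathlib
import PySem

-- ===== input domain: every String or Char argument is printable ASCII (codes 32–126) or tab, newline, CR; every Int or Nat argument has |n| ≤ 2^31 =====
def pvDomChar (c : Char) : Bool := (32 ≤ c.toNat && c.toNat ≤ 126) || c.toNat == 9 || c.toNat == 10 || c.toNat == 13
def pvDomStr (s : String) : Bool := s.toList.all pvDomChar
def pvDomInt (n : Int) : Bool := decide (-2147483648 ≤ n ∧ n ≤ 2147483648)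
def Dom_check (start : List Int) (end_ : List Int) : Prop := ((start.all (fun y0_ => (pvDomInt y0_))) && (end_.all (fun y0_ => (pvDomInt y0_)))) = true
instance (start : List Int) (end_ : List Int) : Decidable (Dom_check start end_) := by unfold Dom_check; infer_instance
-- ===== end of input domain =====

-- B replaces A's O(n^2) pair scan by a single O(n) pass tracking the running max/min of start
-- (earliest index) and the best candidate per end-column; objective: faster (asymptotic).


-- ===== PORT A =====
-- literal transliteration of A's nested loops; Python's tuple result is returned as [maxprod, Xpos, Ypos]
def check (start : List Int) (end_ : List Int) : List Int :=
  let r := (PySem.List.pyRange 0 (start.length : Int) 1).foldl (fun st xpos =>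
      (PySem.List.pyRange xpos (end_.length : Int) 1).foldl (fun st ypos =>
        let p := PySem.List.pyGetD start xpos 0 * PySem.List.pyGetD end_ ypos 0
        if p > st.1 then (p, xpos, ypos) else st) st)
    ((-1 : Int), (1 : Int), (1 : Int))
  [r.1, r.2.1, r.2.2]

-- ===== PORT B =====
-- B's loop body: update running max/min of start (earliest index), derive this column's best
-- candidate from the sign of e, and merge it into the running best (ties: smaller i, then smaller j).
def mxUpd (s j : Int) (mx0 : Option (Int × Int)) : Int × Int :=
  match mx0 with
  | none => (s, j)
  | some m => if s > m.1 then (s, j) else m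

def mnUpd (s j : Int) (mn0 : Option (Int × Int)) : Int × Int :=
  match mn0 with
  | none => (s, j)
  | some m => if s < m.1 then (s, j) else m

def mergeBest (p i j : Int) (b0 : Option (Int × Int × Int)) : Option (Int × Int × Int) :=
  match b0 with
  | none => if p > -1 then some (p, i, j) else none
  | some b => if p > -1 ∧ (p > b.1 ∨ (p = b.1 ∧ i < b.2.1)) then some (p, i, j) else some b

def bstep (start : List Int) (st : Option (Int × Int) × Option (Int × Int) × Option (Int × Int × Int))
    (je : Int × Int) : Option (Int × Int) × Option (Int × Int) × Option (Int × Int × Int) :=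
  let j := je.1
  let e := je.2
  let s := PySem.List.pyGetD start j 0
  let mx := mxUpd s j st.1
  let mn := mnUpd s j st.2.1
  let pi : Int × Int := if e > 0 then (mx.1 * e, mx.2) else if e < 0 then (mn.1 * e, mn.2) else (0, 0)
  (some mx, some mn, mergeBest pi.1 pi.2 j st.2.2)

def bfinal (r : Option (Int × Int × Int)) : List Int :=
  match r with
  | none => [-1, 1, 1]
  | some b => [b.1, b.2.1, b.2.2]

def check_alt (start : List Int) (end_ : List Int) : List Int :=
  let r := (PySem.List.enumerate end_ 0).foldl (bstep start) (none, none, none)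
  bfinal r.2.2

-- ===== PRECONDITION & SPEC =====
-- Pre_ excludes exactly the inputs where A's `assert len(start) == len(end)` raises AssertionError.
def Pre_check (start : List Int) (end_ : List Int) : Prop := start.length = end_.length
instance (start : List Int) (end_ : List Int) : Decidable (Pre_check start end_) := by unfold Pre_check; infer_instance
def pvWitness_check : List Int × List Int := ([1, -2], [3, 4])

def Spec_check (start : List Int) (end_ : List Int) (out : List Int) : Prop := out = check_alt start end_
instance (start : List Int) (end_ : List Int) (out : List Int) : Decidable (Spec_check start end_ out) := by unfold Spec_check; infer_instance

-- ===== CLAIM (what is proved, stated in full; the proofs are below) =====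
def Claim_equal_check : Prop := ∀ (start : List Int) (end_ : List Int), Dom_check start end_ → Pre_check start end_ → Spec_check start end_ (check start end_)

-- ===== LEMMAS AND PROOFS =====

-- product of the entries at (x, y), 0 outside range (indices are in range wherever it is used)
def pprod (start end_ : List Int) (x y : Nat) : Int := start.getD x 0 * end_.getD y 0

-- "no processed pair has product > -1"
def NoneGood (f : Nat → Nat → Int) (S : Nat → Nat → Prop) : Prop := ∀ x y, S x y → f x y ≤ -1

-- "(p, i, j) is the lex-least maximizer among processed pairs, and p > -1"
def SomeGood (f : Nat → Nat → Int) (S : Nat → Nat → Prop) (p i j : Int) : Prop :=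
  ∃ X Y : Nat, i = (X : Int) ∧ j = (Y : Int) ∧ S X Y ∧ p = f X Y ∧ -1 < p ∧
    (∀ x y, S x y → f x y ≤ p) ∧ (∀ x y, S x y → f x y = p → (X < x ∨ (X = x ∧ Y ≤ y)))

def InvA (f : Nat → Nat → Int) (S : Nat → Nat → Prop) (st : Int × Int × Int) : Prop :=
  (st = (-1, 1, 1) ∧ NoneGood f S) ∨ SomeGood f S st.1 st.2.1 st.2.2

def InvO (f : Nat → Nat → Int) (S : Nat → Nat → Prop) (st : Option (Int × Int × Int)) : Prop :=
  match st with
  | none => NoneGood f S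
  | some b => SomeGood f S b.1 b.2.1 b.2.2

-- pair sets: A's processed prefix (full rows < k plus row k up to column a); B's full columns < k
def SA (n k a : Nat) (x y : Nat) : Prop := (x < k ∧ x ≤ y ∧ y < n) ∨ (x = k ∧ x ≤ y ∧ y < a)
def SB (k : Nat) (x y : Nat) : Prop := x ≤ y ∧ y < k

lemma NoneGood_congr {f f' : Nat → Nat → Int} {S S' : Nat → Nat → Prop}
    (hS : ∀ x y, S' x y ↔ S x y) (hf : ∀ x y, S x y → f x y = f' x y) :
    NoneGood f S → NoneGood f' S' := by
  intro h x y hxy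
  rw [← hf x y ((hS x y).1 hxy)]; exact h x y ((hS x y).1 hxy)

lemma SomeGood_congr {f f' : Nat → Nat → Int} {S S' : Nat → Nat → Prop} {p i j : Int}
    (hS : ∀ x y, S' x y ↔ S x y) (hf : ∀ x y, S x y → f x y = f' x y) :
    SomeGood f S p i j → SomeGood f' S' p i j := by
  rintro ⟨X, Y, hi, hj, hXY, hp, hpos, hmax, hmin⟩
  refine ⟨X, Y, hi, hj, (hS X Y).2 hXY, by rw [hp, hf X Y hXY], hpos, ?_, ?_⟩
  · intro x y hxy; rw [← hf x y ((hS x y).1 hxy)]; exact hmax x y ((hS x y).1 hxy)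
  · intro x y hxy he; exact hmin x y ((hS x y).1 hxy) (by rw [hf x y ((hS x y).1 hxy)]; exact he)

lemma InvA_congr {f f' : Nat → Nat → Int} {S S' : Nat → Nat → Prop} {st : Int × Int × Int}
    (hS : ∀ x y, S' x y ↔ S x y) (hf : ∀ x y, S x y → f x y = f' x y) :
    InvA f S st → InvA f' S' st := by
  rintro (⟨h1, h2⟩ | h)
  · exact Or.inl ⟨h1, NoneGood_congr hS hf h2⟩
  · exact Or.inr (SomeGood_congr hS hf h)

lemma InvO_congr {f f' : Nat → Nat → Int} {S S' : Nat → Nat → Prop} {st : Option (Int × Int × Int)}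
    (hS : ∀ x y, S' x y ↔ S x y) (hf : ∀ x y, S x y → f x y = f' x y) :
    InvO f S st → InvO f' S' st := by
  cases st with
  | none => exact NoneGood_congr hS hf
  | some b => exact SomeGood_congr hS hf

-- A's step: one new pair (k, a), lex-greater than everything processed so far
lemma stepA {f : Nat → Nat → Int} {n k a : Nat} {st : Int × Int × Int}
    (hA : InvA f (SA n k a) st) (hk : k ≤ a) :
    InvA f (SA n k (a + 1)) (if f k a > st.1 then (f k a, (k : Int), (a : Int)) else st) := by
  have hmem : SA n k (a + 1) k a := Or.inr ⟨rfl, hk, Nat.lt_succ_self a⟩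
  rcases hA with ⟨hst, hng⟩ | ⟨X, Y, hi, hj, hXY, hp, hpos, hmax, hmin⟩
  · subst hst
    by_cases h : f k a > -1
    · rw [if_pos h]
      refine Or.inr ⟨k, a, rfl, rfl, hmem, rfl, h, ?_, ?_⟩
      · rintro x y (hold | ⟨hx, hxy, hy⟩)
        · exact le_trans (hng x y (Or.inl hold)) (le_of_lt h)
        · rcases Nat.lt_or_ge y a with hlt | hge
          · exact le_trans (hng x y (Or.inr ⟨hx, hxy, hlt⟩)) (le_of_lt h)
          · have : x = k ∧ y = a := ⟨hx, by omega⟩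
            rw [this.1, this.2]
      · rintro x y (hold | ⟨hx, hxy, hy⟩) heq
        · exact absurd (hng x y (Or.inl hold)) (by rw [heq]; omega)
        · rcases Nat.lt_or_ge y a with hlt | hge
          · exact absurd (hng x y (Or.inr ⟨hx, hxy, hlt⟩)) (by rw [heq]; omega)
          · right; exact ⟨hx.symm, by omega⟩
    · rw [if_neg h]
      refine Or.inl ⟨rfl, ?_⟩
      rintro x y (hold | ⟨hx, hxy, hy⟩)
      · exact hng x y (Or.inl hold)
      · rcases Nat.lt_or_ge y a with hlt | hge
        · exact hng x y (Or.inr ⟨hx, hxy, hlt⟩)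
        · have : x = k ∧ y = a := ⟨hx, by omega⟩
          rw [this.1, this.2]; omega
  · have hSA : ∀ x y, SA n k a x y → SA n k (a + 1) x y := by
      rintro x y (hold | ⟨hx, hxy, hy⟩)
      · exact Or.inl hold
      · exact Or.inr ⟨hx, hxy, by omega⟩
    by_cases h : f k a > st.1
    · rw [if_pos h]
      refine Or.inr ⟨k, a, rfl, rfl, hmem, rfl, by omega, ?_, ?_⟩
      · rintro x y (hold | ⟨hx, hxy, hy⟩)
        · exact le_trans (hmax x y (Or.inl hold)) (by omega)
        · rcases Nat.lt_or_ge y a with hlt | hge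
          · exact le_trans (hmax x y (Or.inr ⟨hx, hxy, hlt⟩)) (by omega)
          · have : x = k ∧ y = a := ⟨hx, by omega⟩
            rw [this.1, this.2]
      · rintro x y (hold | ⟨hx, hxy, hy⟩) heq
        · exact absurd (hmax x y (Or.inl hold)) (by rw [heq]; omega)
        · rcases Nat.lt_or_ge y a with hlt | hge
          · exact absurd (hmax x y (Or.inr ⟨hx, hxy, hlt⟩)) (by rw [heq]; omega)
          · right; exact ⟨hx.symm, by omega⟩
    · rw [if_neg h]
      refine Or.inr ⟨X, Y, hi, hj, hSA X Y hXY, hp, hpos, ?_, ?_⟩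
      · rintro x y (hold | ⟨hx, hxy, hy⟩)
        · exact hmax x y (Or.inl hold)
        · rcases Nat.lt_or_ge y a with hlt | hge
          · exact hmax x y (Or.inr ⟨hx, hxy, hlt⟩)
          · have hxy2 : x = k ∧ y = a := ⟨hx, by omega⟩
            rw [hxy2.1, hxy2.2]; omega
      · rintro x y (hold | ⟨hx, hxy, hy⟩) heq
        · exact hmin x y (Or.inl hold) heq
        · rcases Nat.lt_or_ge y a with hlt | hge
          · exact hmin x y (Or.inr ⟨hx, hxy, hlt⟩) heq
          · have hxy2 : x = k ∧ y = a := ⟨hx, by omega⟩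
            -- (X, Y) ∈ SA n k a, so X < k, or X = k and Y < a: lex-below (k, a) = (x, y)
            rcases hXY with hXold | ⟨hXk, _, hYa⟩
            · left; omega
            · rcases Nat.lt_or_ge Y a with hYlt | hYge
              · right; omega
              · -- Y < a from SA n k a second disjunct
                omega

-- A's inner loop over row k
lemma rowA {f : Nat → Nat → Int} {n k : Nat} :
    ∀ (m : Nat), k + m ≤ n → ∀ st, InvA f (SA n k k) st →
      InvA f (SA n k (k + m))
        ((List.range m).foldl (fun st t => if f k (k + t) > st.1 then (f k (k + t), (k : Int), ((k + t : Nat) : Int)) else st) st) := by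
  intro m
  induction m with
  | zero => intro _ st h; simpa using h
  | succ m ih =>
    intro hm st h
    rw [List.range_succ, List.foldl_append, List.foldl_cons, List.foldl_nil]
    have hstep := stepA (f := f) (n := n) (k := k) (a := k + m)
      (ih (by omega) st h) (by omega)
    have heq : k + m + 1 = k + (m + 1) := by omega
    rwa [heq] at hstep

-- A's outer loop
lemma outerA {f : Nat → Nat → Int} {n : Nat} :
    ∀ (m : Nat), m ≤ n →
      InvA f (SA n m m)
        ((List.range m).foldl (fun st k =>
          (List.range (n - k)).foldl (fun st t => if f k (k + t) > st.1 then (f k (k + t), (k : Int), ((k + t : Nat) : Int)) else st) st)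
          (-1, 1, 1)) := by
  intro m
  induction m with
  | zero =>
    intro _
    rw [List.range_zero, List.foldl_nil]
    exact Or.inl ⟨rfl, by rintro x y (h | h) <;> omega⟩
  | succ m ih =>
    intro hm
    rw [List.range_succ, List.foldl_append, List.foldl_cons, List.foldl_nil]
    have hrow := rowA (f := f) (n := n) (k := m) (n - m) (by omega) _ (ih (by omega))
    have hset : m + (n - m) = n := by omega
    rw [hset] at hrow
    refine InvA_congr ?_ (fun _ _ _ => rfl) hrow
    intro x y
    simp only [SA]
    omega

-- check in terms of the nat-indexed fold
lemma check_eq_nat (start end_ : List Int) :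
    check start end_ =
      (let r := (List.range start.length).foldl (fun st k =>
          (List.range (end_.length - k)).foldl
            (fun st t => if pprod start end_ k (k + t) > st.1 then (pprod start end_ k (k + t), (k : Int), ((k + t : Nat) : Int)) else st) st)
          (-1, 1, 1)
       [r.1, r.2.1, r.2.2]) := by
  have hinner : ∀ (st : Int × Int × Int) (k : Nat),
      (PySem.List.pyRange (k : Int) (end_.length : Int) 1).foldl
        (fun st ypos =>
          let p := PySem.List.pyGetD start (k : Int) 0 * PySem.List.pyGetD end_ ypos 0
          if p > st.1 then (p, (k : Int), ypos) else st) st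
      = (List.range (end_.length - k)).foldl
          (fun st t => if pprod start end_ k (k + t) > st.1 then (pprod start end_ k (k + t), (k : Int), ((k + t : Nat) : Int)) else st) st := by
    intro st k
    have htn : (((end_.length : Int)) - (k : Int)).toNat = end_.length - k := by omega
    have hr : PySem.List.pyRange (k : Int) (end_.length : Int) 1
        = (List.range (end_.length - k)).map (fun t : Nat => ((k + t : Nat) : Int)) := by
      rw [PySem.List.pyRange_one, htn]
      apply List.map_congr_left
      intro t _
      push_cast
      ring
    rw [hr, List.foldl_map]
    apply List.foldl_ext
    intro st' t _
    rw [PySem.List.pyGetD_natCast, PySem.List.pyGetD_natCast]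
    simp only [pprod]
  have houter : PySem.List.pyRange 0 (start.length : Int) 1
      = (List.range start.length).map (fun k : Nat => (k : Int)) := by
    rw [PySem.List.pyRange_one]
    simp
  unfold check
  rw [houter, List.foldl_map]
  simp only [hinner]

-- B-side invariants for the running max / min of start over the first k entries
def InvMx (start : List Int) (k : Nat) (mx : Option (Int × Int)) : Prop :=
  match mx with
  | none => k = 0
  | some m => ∃ I : Nat, m.2 = (I : Int) ∧ I < k ∧ start.getD I 0 = m.1 ∧
      (∀ t, t < k → start.getD t 0 ≤ m.1) ∧ (∀ t, t < I → start.getD t 0 < m.1)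

def InvMn (start : List Int) (k : Nat) (mn : Option (Int × Int)) : Prop :=
  match mn with
  | none => k = 0
  | some m => ∃ I : Nat, m.2 = (I : Int) ∧ I < k ∧ start.getD I 0 = m.1 ∧
      (∀ t, t < k → m.1 ≤ start.getD t 0) ∧ (∀ t, t < I → m.1 < start.getD t 0)

def InvBAll (start ys : List Int) (st : Option (Int × Int) × Option (Int × Int) × Option (Int × Int × Int)) : Prop :=
  InvMx start ys.length st.1 ∧ InvMn start ys.length st.2.1 ∧ InvO (pprod start ys) (SB ys.length) st.2.2

-- merging a column's best candidate into the running best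
lemma bestStep {f : Nat → Nat → Int} {k : Nat} {best : Option (Int × Int × Int)}
    (hb : InvO f (SB k) best) (p i : Int) (I : Nat) (hi : i = (I : Int)) (hIk : I ≤ k)
    (hp : p = f I k) (hmax : ∀ t, t ≤ k → f t k ≤ p) (hmin : ∀ t, t ≤ k → f t k = p → I ≤ t) :
    InvO f (SB (k + 1)) (mergeBest p i (k : Int) best) := by
  cases best with
  | none =>
    simp only [mergeBest]
    by_cases h : p > -1
    · rw [if_pos h]
      refine ⟨I, k, hi, rfl, ⟨hIk, Nat.lt_succ_self k⟩, hp, h, ?_, ?_⟩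
      · rintro x y ⟨hxy, hyk⟩
        rcases Nat.lt_or_ge y k with hlt | hge
        · exact le_trans (hb x y ⟨hxy, hlt⟩) (by omega)
        · have hy : y = k := by omega
          subst hy; exact hmax x hxy
      · rintro x y ⟨hxy, hyk⟩ heq
        rcases Nat.lt_or_ge y k with hlt | hge
        · exact absurd (hb x y ⟨hxy, hlt⟩) (by rw [heq]; omega)
        · have hy : y = k := by omega
          subst hy
          have := hmin x hxy heq
          omega
    · rw [if_neg h]
      rintro x y ⟨hxy, hyk⟩
      rcases Nat.lt_or_ge y k with hlt | hge
      · exact hb x y ⟨hxy, hlt⟩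
      · have hy : y = k := by omega
        subst hy
        exact le_trans (hmax x hxy) (by omega)
  | some b =>
    simp only [mergeBest]
    obtain ⟨X, Y, hiX, hjY, ⟨hXY, hYk⟩, hpb, hposb, hmaxb, hminb⟩ := hb
    by_cases h : p > -1 ∧ (p > b.1 ∨ (p = b.1 ∧ i < b.2.1))
    · rw [if_pos h]
      have hple : b.1 ≤ p := by rcases h.2 with h2 | h2 <;> omega
      refine ⟨I, k, hi, rfl, ⟨hIk, Nat.lt_succ_self k⟩, hp, h.1, ?_, ?_⟩
      · rintro x y ⟨hxy, hyk⟩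
        rcases Nat.lt_or_ge y k with hlt | hge
        · exact le_trans (hmaxb x y ⟨hxy, hlt⟩) hple
        · have hy : y = k := by omega
          subst hy; exact hmax x hxy
      · rintro x y ⟨hxy, hyk⟩ heq
        rcases Nat.lt_or_ge y k with hlt | hge
        · have h1 : f x y ≤ b.1 := hmaxb x y ⟨hxy, hlt⟩
          rcases h.2 with h2 | ⟨h2, h3⟩
          · omega
          · have h4 := hminb x y ⟨hxy, hlt⟩ (by omega)
            have h5 : (I : Int) < (X : Int) := by rw [← hi, ← hiX]; exact h3
            left; omega
        · have hy : y = k := by omega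
          subst hy
          have := hmin x hxy heq
          omega
    · rw [if_neg h]
      refine ⟨X, Y, hiX, hjY, ⟨hXY, by omega⟩, hpb, hposb, ?_, ?_⟩
      · rintro x y ⟨hxy, hyk⟩
        rcases Nat.lt_or_ge y k with hlt | hge
        · exact hmaxb x y ⟨hxy, hlt⟩
        · have hy : y = k := by omega
          subst hy
          have h1 := hmax x hxy
          by_cases hc : p > -1
          · have h2 : ¬ (p > b.1 ∨ (p = b.1 ∧ i < b.2.1)) := fun hx => h ⟨hc, hx⟩
            omega
          · omega
      · rintro x y ⟨hxy, hyk⟩ heq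
        rcases Nat.lt_or_ge y k with hlt | hge
        · exact hminb x y ⟨hxy, hlt⟩ heq
        · have hy : y = k := by omega
          subst hy
          have h1 := hmax x hxy
          by_cases hc : p > -1
          · have h2 : ¬ (p > b.1 ∨ (p = b.1 ∧ i < b.2.1)) := fun hx => h ⟨hc, hx⟩
            have hpeq : p = b.1 := by omega
            have hXI : (X : Int) ≤ (I : Int) := by rw [← hi, ← hiX]; omega
            have h3 := hmin x hxy (by omega)
            rcases Nat.lt_or_ge X x with hl | hg
            · left; exact hl
            · right
              have hXx : X = x := by omega
              exact ⟨hXx, by omega⟩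
          · omega

-- one update of the running max of start (earliest index kept)
lemma mxStep (start : List Int) (k : Nat) (mx0 : Option (Int × Int)) (hmx : InvMx start k mx0) :
    InvMx start (k + 1) (some (mxUpd (start.getD k 0) (k : Int) mx0)) := by
  cases mx0 with
  | none =>
    have hk : k = 0 := hmx
    subst hk
    simp only [mxUpd]
    refine ⟨0, rfl, Nat.lt_succ_self 0, rfl, ?_, ?_⟩
    · intro t ht
      have h0 : t = 0 := by omega
      subst h0
      exact le_refl _
    · intro t ht
      exact absurd ht (Nat.not_lt_zero t)
  | some m =>
    simp only [mxUpd]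
    obtain ⟨I, hI2, hIlt, hIv, hall, hstrict⟩ := hmx
    by_cases hgt : start.getD k 0 > m.1
    · rw [if_pos hgt]
      refine ⟨k, rfl, Nat.lt_succ_self k, rfl, ?_, ?_⟩
      · intro t ht
        rcases Nat.lt_or_ge t k with hlt | hge
        · exact le_trans (hall t hlt) (le_of_lt hgt)
        · have : t = k := by omega
          subst this; exact le_refl _
      · intro t ht; exact lt_of_le_of_lt (hall t ht) hgt
    · rw [if_neg hgt]
      refine ⟨I, hI2, by omega, hIv, ?_, hstrict⟩
      intro t ht
      rcases Nat.lt_or_ge t k with hlt | hge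
      · exact hall t hlt
      · have : t = k := by omega
        subst this; omega

lemma mnStep (start : List Int) (k : Nat) (mn0 : Option (Int × Int)) (hmn : InvMn start k mn0) :
    InvMn start (k + 1) (some (mnUpd (start.getD k 0) (k : Int) mn0)) := by
  cases mn0 with
  | none =>
    have hk : k = 0 := hmn
    subst hk
    simp only [mnUpd]
    refine ⟨0, rfl, Nat.lt_succ_self 0, rfl, ?_, ?_⟩
    · intro t ht
      have h0 : t = 0 := by omega
      subst h0
      exact le_refl _
    · intro t ht
      exact absurd ht (Nat.not_lt_zero t)
  | some m =>
    simp only [mnUpd]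
    obtain ⟨I, hI2, hIlt, hIv, hall, hstrict⟩ := hmn
    by_cases hlt' : start.getD k 0 < m.1
    · rw [if_pos hlt']
      refine ⟨k, rfl, Nat.lt_succ_self k, rfl, ?_, ?_⟩
      · intro t ht
        rcases Nat.lt_or_ge t k with hlt | hge
        · exact le_trans (le_of_lt hlt') (hall t hlt)
        · have : t = k := by omega
          subst this; exact le_refl _
      · intro t ht; exact lt_of_lt_of_le hlt' (hall t ht)
    · rw [if_neg hlt']
      refine ⟨I, hI2, by omega, hIv, ?_, hstrict⟩
      intro t ht
      rcases Nat.lt_or_ge t k with hlt | hge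
      · exact hall t hlt
      · have : t = k := by omega
        subst this; omega

lemma bstepLemma (start ys : List Int) (c : Int)
    (st : Option (Int × Int) × Option (Int × Int) × Option (Int × Int × Int))
    (hInv : InvBAll start ys st) :
    InvBAll start (ys ++ [c]) (bstep start st ((ys.length : Int), c)) := by
  obtain ⟨mx0, mn0, b0⟩ := st
  obtain ⟨hmx, hmn, hb⟩ := hInv
  -- the value of the new column of pprod, and invariance of the old columns
  have hgc : (ys ++ [c]).getD ys.length 0 = c := by
    rw [List.getD_append_right ys [c] 0 ys.length (le_refl _)]
    simp
  have hfk : ∀ t, pprod start (ys ++ [c]) t ys.length = start.getD t 0 * c := by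
    intro t; unfold pprod; rw [hgc]
  have hold : ∀ x y, SB ys.length x y → pprod start ys x y = pprod start (ys ++ [c]) x y := by
    rintro x y ⟨_, hyk⟩
    unfold pprod
    rw [List.getD_append ys [c] 0 y hyk]
  have hb' : InvO (pprod start (ys ++ [c])) (SB ys.length) b0 :=
    InvO_congr (fun _ _ => Iff.rfl) hold hb
  have hlen1 : (ys ++ [c]).length = ys.length + 1 := by simp
  unfold bstep
  simp only [PySem.List.pyGetD_natCast]
  refine ⟨?_, ?_, ?_⟩
  · rw [hlen1]; exact mxStep start ys.length mx0 hmx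
  · rw [hlen1]; exact mnStep start ys.length mn0 hmn
  · rw [hlen1]
    have hmx' := mxStep start ys.length mx0 hmx
    have hmn' := mnStep start ys.length mn0 hmn
    set mxv := mxUpd (start.getD ys.length 0) (ys.length : Int) mx0 with hmxv
    set mnv := mnUpd (start.getD ys.length 0) (ys.length : Int) mn0 with hmnv
    obtain ⟨Ix, hIx2, hIxlt, hIxv, hallx, hstrictx⟩ := hmx'
    obtain ⟨In, hIn2, hInlt, hInv2, halln, hstrictn⟩ := hmn'
    rcases lt_trichotomy c 0 with hc | hc | hc
    · rw [if_neg (by omega), if_pos hc]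
      refine bestStep hb' (mnv.1 * c) mnv.2 In hIn2 (by omega) ?_ ?_ ?_
      · rw [hfk In, hInv2]
      · intro t ht
        rw [hfk t]
        exact mul_le_mul_of_nonpos_right (halln t (by omega)) (le_of_lt hc)
      · intro t ht heq
        rw [hfk t] at heq
        have hv : start.getD t 0 = mnv.1 := mul_right_cancel₀ (by omega) heq
        by_contra h'
        exact absurd hv (ne_of_gt (hstrictn t (by omega)))
    · subst hc
      rw [if_neg (by omega), if_neg (by omega)]
      refine bestStep hb' 0 0 0 rfl (Nat.zero_le _) ?_ ?_ ?_
      · rw [hfk 0, mul_zero]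
      · intro t ht; rw [hfk t, mul_zero]
      · intro t _ _; exact Nat.zero_le t
    · rw [if_pos hc]
      refine bestStep hb' (mxv.1 * c) mxv.2 Ix hIx2 (by omega) ?_ ?_ ?_
      · rw [hfk Ix, hIxv]
      · intro t ht
        rw [hfk t]
        exact mul_le_mul_of_nonneg_right (hallx t (by omega)) (le_of_lt hc)
      · intro t ht heq
        rw [hfk t] at heq
        have hv : start.getD t 0 = mxv.1 := mul_right_cancel₀ (by omega) heq
        by_contra h'
        exact absurd hv (ne_of_lt (hstrictx t (by omega)))

lemma Bfold (start : List Int) :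
    ∀ ys : List Int, ys.length ≤ start.length →
      InvBAll start ys ((PySem.List.enumerate ys 0).foldl (bstep start) (none, none, none)) := by
  intro ys
  induction ys using List.reverseRecOn with
  | nil =>
    intro _
    rw [PySem.List.enumerate_nil, List.foldl_nil]
    exact ⟨rfl, rfl, fun x y hxy => absurd hxy.2 (Nat.not_lt_zero y)⟩
  | append_singleton ys c ih =>
    intro hlen
    rw [PySem.List.enumerate_append, List.foldl_append,
        PySem.List.enumerate_cons, PySem.List.enumerate_nil, List.foldl_cons, List.foldl_nil]
    have hstep := bstepLemma start ys c _ (ih (by simp at hlen; omega))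
    simpa using hstep

-- both invariants over the full pair set force equal outputs
lemma final_eq {f : Nat → Nat → Int} {S : Nat → Nat → Prop} {stA : Int × Int × Int}
    {stB : Option (Int × Int × Int)} (hA : InvA f S stA) (hB : InvO f S stB) :
    [stA.1, stA.2.1, stA.2.2] = bfinal stB := by
  unfold bfinal
  cases stB with
  | none =>
    rcases hA with ⟨hst, _⟩ | ⟨X, Y, _, _, hXY, hp, hpos, _, _⟩
    · rw [hst]
    · exact absurd (hB X Y hXY) (by omega)
  | some b =>
    obtain ⟨X, Y, hi, hj, hXY, hp, hpos, hmax, hmin⟩ := hB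
    rcases hA with ⟨hst, hng⟩ | ⟨X', Y', hi', hj', hXY', hp', hpos', hmax', hmin'⟩
    · exact absurd (hng X Y hXY) (by omega)
    · have hpp : stA.1 = b.1 := by
        have h1 := hmax X' Y' hXY'
        have h2 := hmax' X Y hXY
        omega
      have hXX : X = X' ∧ Y = Y' := by
        have h1 := hmin X' Y' hXY' (by omega)
        have h2 := hmin' X Y hXY (by omega)
        omega
      simp only [hpp, hi, hj, hi', hj', hXX.1, hXX.2]

-- ===== VERDICT (by name: the statement is the Claim_ definition above) =====
theorem check_spec : Claim_equal_check := by
  intro start end_ _ hpre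
  unfold Spec_check
  have hpre' : start.length = end_.length := hpre
  obtain ⟨_, _, hbO⟩ := Bfold start end_ (le_of_eq hpre'.symm)
  have hA := outerA (f := pprod start end_) (n := end_.length) start.length (by omega)
  have hA' := InvA_congr (S' := SB end_.length)
    (fun x y => by simp only [SA, SB]; omega) (fun _ _ _ => rfl) hA
  rw [check_eq_nat start end_]
  unfold check_alt
  exact final_eq hA' hbO
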